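-- pv_equiv track=rewrite | github.com/TheLunchtimeAttack/matasano-challenges | python/matasano/set1/c3.py | most
-- ===== SOURCE A (Python) =====
-- def most(charstring): # returns an ordered array of the most common bytes
--     occurrences={} # creates a lookup so that occourances[byte] will return the number of
-- # times that byte appeats in the string
--     for i in range(32, 127):
--         occurrences[chr(i)]=0 # initialises the dictionary
--     for char in charstring:
--         occurrences[char]=0 # +1 for every time a character is found
--     for char in charstring:
--         occurrences[char]+=1 # +1 for every time a character is found
--     most=[] # an ordered list of the most frequent bytes
--     while len(occurrences)>0:
--         most.append(max(occurrences, key=occurrences.get))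
--         del occurrences[max(occurrences, key=occurrences.get)]
--     return most
-- ===== SOURCE B (Python) =====
-- def most(charstring):  # distinct bytes ordered by descending frequency (counting-sort buckets)
--     keys = [chr(i) for i in range(32, 127)]
--     seen = set(keys)
--     for ch in charstring:
--         if ch not in seen:
--             seen.add(ch)
--             keys.append(ch)
--     counts = {}
--     for ch in charstring:
--         counts[ch] = counts.get(ch, 0) + 1
--     maxc = 0
--     for k in keys:
--         if counts.get(k, 0) > maxc:
--             maxc = counts.get(k, 0)
--     buckets = [[] for _ in range(maxc + 1)]
--     for k in keys:
--         buckets[counts.get(k, 0)].append(k)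
--     out = []
--     for c in range(maxc, -1, -1):
--         out.extend(buckets[c])
--     return out
-- ===== Notes on version B (the rewrite author's own statement) =====
-- stated objective: alternative
-- what changed: A repeatedly scans the whole dict for the current max key and deletes it (a quadratic selection-sort drain); B builds the key list and a count dict in single passes and then emits keys via counting-sort buckets indexed by count, iterated from the highest count down, preserving insertion order within equal counts.
import Mathlib
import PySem

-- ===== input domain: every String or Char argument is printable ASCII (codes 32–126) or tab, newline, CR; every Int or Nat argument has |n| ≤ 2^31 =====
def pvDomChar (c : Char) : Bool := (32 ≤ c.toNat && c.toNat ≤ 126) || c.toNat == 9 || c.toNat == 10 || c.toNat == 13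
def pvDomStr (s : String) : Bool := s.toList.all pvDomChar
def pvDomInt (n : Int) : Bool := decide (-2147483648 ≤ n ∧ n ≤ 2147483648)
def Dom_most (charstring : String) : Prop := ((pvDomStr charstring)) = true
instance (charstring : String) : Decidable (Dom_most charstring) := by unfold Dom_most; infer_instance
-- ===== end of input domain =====

-- B replaces A's repeated max-and-delete drain of the dict by a single counting-sort
-- bucket pass (alternative decomposition; identical output, including tie order).
-- Python's 1-character strings are represented as Char internally and converted to
-- String at the very end of each port.

-- ===== PORT A =====
-- the 'while len(occurrences)>0' loop; fuel = number of keys (one key is deleted per turn).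
-- Python evaluates 'max(occurrences, key=occurrences.get)' twice per iteration on the
-- same unchanged dict; both calls yield the same key, so it is ported once.
def mostLoop (d : PySem.Dict Char Int) : Nat → List Char
  | 0 => []
  | n+1 =>
    match PySem.List.max? d.keys (fun k => d.getD k 0) with
    | none => []
    | some k => k :: mostLoop (d.erase k) n

def most (charstring : String) : List String :=
  let d0 := (PySem.List.pyRange 32 127 1).foldl (fun d i => d.insert (Char.ofNat i.toNat) (0 : Int)) PySem.Dict.empty
  let d1 := charstring.toList.foldl (fun d c => d.insert c (0 : Int)) d0
  let d2 := charstring.toList.foldl (fun d c => d.modify c 0 (· + 1)) d1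
  (mostLoop d2 d2.size).map (fun c => String.ofList [c])

-- ===== PORT B =====
-- keys = printables 32..126, then unseen chars in first-appearance order ('seen' is a set)
def mostAltKeys (charstring : String) : List Char × PySem.Set Char :=
  charstring.toList.foldl
    (fun ks c => if PySem.Set.contains ks.2 c then ks else (ks.1 ++ [c], PySem.Set.add ks.2 c))
    ((PySem.List.pyRange 32 127 1).map (fun i => Char.ofNat i.toNat),
     PySem.Set.ofList ((PySem.List.pyRange 32 127 1).map (fun i => Char.ofNat i.toNat)))

def most_alt (charstring : String) : List String :=
  let keys := (mostAltKeys charstring).1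
  let counts := charstring.toList.foldl (fun d c => d.insert c (d.getD c 0 + 1)) (PySem.Dict.empty : PySem.Dict Char Int)
  let maxc := keys.foldl (fun m k => if counts.getD k 0 > m then counts.getD k 0 else m) (0 : Int)
  let buckets := keys.foldl
      (fun bs k => PySem.List.pySetD bs (counts.getD k 0) (PySem.List.pyGetD bs (counts.getD k 0) [] ++ [k]))
      (List.replicate (maxc.toNat + 1) ([] : List Char))
  ((PySem.List.pyRange maxc (-1) (-1)).foldl (fun out c => out ++ PySem.List.pyGetD buckets c []) []).map
    (fun c => String.ofList [c])

-- ===== PRECONDITION & SPEC =====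
def Spec_most (charstring : String) (out : List String) : Prop := out = most_alt charstring
instance (charstring : String) (out : List String) : Decidable (Spec_most charstring out) := by unfold Spec_most; infer_instance

-- ===== CLAIM (what is proved, stated in full; the proofs are below) =====
def Claim_equal_most : Prop := ∀ (charstring : String), Dom_most charstring → Spec_most charstring (most charstring)

-- ===== LEMMAS AND PROOFS =====

theorem runMax_spec (f : Char → Int) :
    ∀ (xs : List Char) (x r : Char), xs.foldl (fun b y => if f b < f y then y else b) x = r →
      ∃ p q, x :: xs = p ++ r :: q ∧ (∀ y ∈ p, f y < f r) ∧ (∀ y ∈ q, f y ≤ f r) := by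
  intro xs
  induction xs with
  | nil => intro x r hr; cases hr; exact ⟨[], [], rfl, by simp, by simp⟩
  | cons y ys ih =>
    intro x r hr
    simp only [List.foldl_cons] at hr
    by_cases h : f x < f y
    · rw [if_pos h] at hr
      obtain ⟨p, q, hdec, hp, hq⟩ := ih y r hr
      have hyr : f y ≤ f r := by
        have : y ∈ p ++ r :: q := by rw [← hdec]; exact List.mem_cons_self
        rcases List.mem_append.1 this with hy | hy
        · exact le_of_lt (hp y hy)
        · rcases List.mem_cons.1 hy with rfl | hy
          · exact le_refl _
          · exact hq y hy
      exact ⟨x :: p, q, by rw [List.cons_append, hdec], by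
        intro z hz
        rcases List.mem_cons.1 hz with rfl | hz
        · exact lt_of_lt_of_le h hyr
        · exact hp z hz, hq⟩
    · rw [if_neg h] at hr
      obtain ⟨p, q, hdec, hp, hq⟩ := ih x r hr
      cases p with
      | nil =>
        simp only [List.nil_append] at hdec
        obtain ⟨rfl, rfl⟩ : x = r ∧ ys = q := by
          have := List.cons.injEq x ys r q ▸ hdec; exact ⟨by injection hdec, by injection hdec⟩
        refine ⟨[], y :: ys, rfl, by simp, ?_⟩
        intro z hz
        rcases List.mem_cons.1 hz with rfl | hz
        · exact le_of_not_gt h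
        · exact hq z hz
      | cons a p' =>
        obtain ⟨rfl, hys⟩ : x = a ∧ ys = p' ++ r :: q := ⟨by injection hdec, by injection hdec⟩
        have hxr : f x < f r := hp x List.mem_cons_self
        refine ⟨x :: y :: p', q, by rw [hys]; simp, ?_, hq⟩
        intro z hz
        rcases List.mem_cons.1 hz with rfl | hz
        · exact hxr
        rcases List.mem_cons.1 hz with rfl | hz
        · exact lt_of_le_of_lt (le_of_not_gt h) hxr
        · exact hp z (List.mem_cons_of_mem _ hz)

theorem max?_cons_eq (f : Char → Int) (x : Char) (xs : List Char) :
    PySem.List.max? (x :: xs) f = some (xs.foldl (fun b y => if f b < f y then y else b) x) := by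
  show List.foldl _ (some x) xs = _
  induction xs generalizing x with
  | nil => rfl
  | cons y ys ih => simp only [List.foldl_cons]; by_cases h : f x < f y <;> simp [h, ih]

def sel (f : Char → Int) : List Char → Nat → List Char
  | _, 0 => []
  | ks, n+1 =>
    match PySem.List.max? ks f with
    | none => []
    | some k => k :: sel f (ks.erase k) n

def bcat (f : Char → Int) (ks : List Char) : Int → Nat → List Char
  | _, 0 => []
  | M, n+1 => ks.filter (fun k => f k == M) ++ bcat f ks (M-1) n

theorem bcat_nil (f : Char → Int) : ∀ (n : Nat) (M : Int), bcat f [] M n = [] := by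
  intro n; induction n with
  | zero => intro M; rfl
  | succ n ih => intro M; simp [bcat, ih]

theorem bcat_congr (f : Char → Int) (ks ks' : List Char) :
    ∀ (n : Nat) (M : Int),
      (∀ c : Int, c ≤ M → ks.filter (fun k => f k == c) = ks'.filter (fun k => f k == c)) →
      bcat f ks M n = bcat f ks' M n := by
  intro n
  induction n with
  | zero => intro M _; rfl
  | succ n ih =>
    intro M hfil
    simp only [bcat]
    rw [hfil M le_rfl, ih (M-1) (fun c hc => hfil c (by omega))]

theorem bcat_extract (f : Char → Int) (p q : List Char) (r : Char)
    (hp : ∀ y ∈ p, f y < f r) (hq : ∀ y ∈ q, f y ≤ f r) (hr0 : 0 ≤ f r) :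
    ∀ (n : Nat) (M : Int), f r ≤ M → M.toNat < n →
      bcat f (p ++ r :: q) M n = r :: bcat f (p ++ q) M n := by
  have hfil_ne : ∀ c : Int, c ≠ f r →
      (p ++ r :: q).filter (fun k => f k == c) = (p ++ q).filter (fun k => f k == c) := by
    intro c hc
    simp only [List.filter_append, List.filter_cons]
    have : (f r == c) = false := by rw [beq_eq_false_iff_ne]; omega
    simp [this]
  intro n
  induction n with
  | zero => intro M _ h; omega
  | succ n ih =>
    intro M hM hlt
    rcases eq_or_lt_of_le hM with rfl | hlt'
    · -- M = f r : extract r at this level, lower levels agree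
      simp only [bcat]
      have hhead : (p ++ r :: q).filter (fun k => f k == f r) = r :: q.filter (fun k => f k == f r) := by
        have hpf : p.filter (fun k => f k == f r) = [] := by
          apply List.filter_eq_nil_iff.2
          intro y hy
          have := hp y hy
          simp; omega
        simp [List.filter_append, hpf]
      have hhead' : (p ++ q).filter (fun k => f k == f r) = q.filter (fun k => f k == f r) := by
        have hpf : p.filter (fun k => f k == f r) = [] := by
          apply List.filter_eq_nil_iff.2
          intro y hy
          have := hp y hy
          simp; omega
        simp [List.filter_append, hpf]
      rw [hhead, hhead', bcat_congr f _ _ n (f r - 1) (fun c hc => hfil_ne c (by omega))]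
      simp
    · -- f r < M : nothing at this level, recurse
      simp only [bcat]
      have h1 : (p ++ r :: q).filter (fun k => f k == M) = [] := by
        apply List.filter_eq_nil_iff.2
        intro y hy
        simp only [List.mem_append, List.mem_cons] at hy
        have : f y ≤ f r := by
          rcases hy with hy | rfl | hy
          · exact le_of_lt (hp y hy)
          · exact le_rfl
          · exact hq y hy
        simp; omega
      have h2 : (p ++ q).filter (fun k => f k == M) = [] := by
        apply List.filter_eq_nil_iff.2
        intro y hy
        simp only [List.mem_append] at hy
        have : f y ≤ f r := by
          rcases hy with hy | hy
          · exact le_of_lt (hp y hy)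
          · exact hq y hy
        simp; omega
      rw [h1, h2, ih (M-1) (by omega) (by omega)]
      simp

theorem sel_eq_bcat (f : Char → Int) (M : Int) (hM : 0 ≤ M) :
    ∀ (n : Nat) (ks : List Char), ks.length ≤ n →
      (∀ k ∈ ks, 0 ≤ f k ∧ f k ≤ M) →
      sel f ks n = bcat f ks M (M+1).toNat := by
  intro n
  induction n with
  | zero =>
    intro ks hlen _
    rw [List.length_eq_zero_iff.1 (Nat.le_zero.1 hlen)]
    exact (bcat_nil f _ M).symm
  | succ n ih =>
    intro ks hlen hb
    match ks with
    | [] => exact (bcat_nil f _ M).symm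
    | x :: xs =>
      obtain ⟨p, q, hdec, hp, hq⟩ := runMax_spec f xs x _ rfl
      set r := xs.foldl (fun b y => if f b < f y then y else b) x with hr
      have hrmem : r ∈ x :: xs := by rw [hdec]; simp
      have hrb := hb r hrmem
      have hrnp : r ∉ p := fun h => absurd (hp r h) (lt_irrefl _)
      have herase : (x :: xs).erase r = p ++ q := by
        rw [hdec, List.erase_append_right _ hrnp, List.erase_cons_head]
      have hlen' : (p ++ q).length ≤ n := by
        have : (x :: xs).length = (p ++ q).length + 1 := by
          rw [hdec]; simp; omega
        omega
      have hsub : ∀ k ∈ p ++ q, k ∈ x :: xs := by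
        intro k hk
        rw [hdec]
        simp only [List.mem_append, List.mem_cons] at hk ⊢
        tauto
      calc sel f (x :: xs) (n+1)
          = r :: sel f (p ++ q) n := by
            simp only [sel, max?_cons_eq, ← hr, herase]
        _ = r :: bcat f (p ++ q) M (M+1).toNat := by
            rw [ih (p ++ q) hlen' (fun k hk => hb k (hsub k hk))]
        _ = bcat f (x :: xs) M (M+1).toNat := by
            rw [hdec, bcat_extract f p q r hp hq hrb.1 _ M hrb.2 (by omega)]

theorem max?_congr (f g : Char → Int) (ks : List Char) (h : ∀ k ∈ ks, f k = g k) :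
    PySem.List.max? ks f = PySem.List.max? ks g := by
  match ks with
  | [] => rfl
  | x :: xs =>
    rw [max?_cons_eq, max?_cons_eq]
    congr 1
    induction xs generalizing x with
    | nil => rfl
    | cons y ys ih =>
      have hx : f x = g x := h x List.mem_cons_self
      have hy : f y = g y := h y (by simp)
      simp only [List.foldl_cons, hx, hy]
      by_cases hc : g x < g y
      · simp only [if_pos hc]
        exact ih y (fun k hk => h k (by simp only [List.mem_cons] at hk ⊢; tauto))
      · simp only [if_neg hc]
        exact ih x (fun k hk => h k (by simp only [List.mem_cons] at hk ⊢; tauto))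

theorem sel_congr (f g : Char → Int) :
    ∀ (n : Nat) (ks : List Char), (∀ k ∈ ks, f k = g k) → sel f ks n = sel g ks n := by
  intro n
  induction n with
  | zero => intro ks _; rfl
  | succ n ih =>
    intro ks h
    simp only [sel, max?_congr f g ks h]
    match hm : PySem.List.max? ks g with
    | none => rfl
    | some k =>
      have hk : k ∈ ks := PySem.List.max?_mem hm
      dsimp only
      rw [ih (ks.erase k) (fun x hx => h x (List.mem_of_mem_erase hx))]

theorem keys_erase_eq (d : PySem.Dict Char Int) (k : Char) :
    (d.erase k).keys = d.keys.filter (fun x => !(x == k)) := by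
  simp [PySem.Dict.erase, PySem.Dict.keys, List.filter_map, Function.comp_def]

theorem find?_filter_ne (k k' : Char) (h : k' ≠ k) :
    ∀ (l : List (Char × Int)),
      (l.filter (fun p => !(p.1 == k))).find? (fun p => p.1 == k') = l.find? (fun p => p.1 == k') := by
  intro l
  induction l with
  | nil => rfl
  | cons x xs ih =>
    by_cases hx : x.1 = k'
    · have h1 : (x.1 == k) = false := by simp [hx, h]
      have h2 : (x.1 == k') = true := by simp [hx]
      simp [h1, h2]
    · have h2 : (x.1 == k') = false := by simp [hx]
      by_cases hxk : x.1 = k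
      · have h4 : (x.1 == k) = true := by simp [hxk]
        simp [h4, h2, ih]
      · have h4 : (x.1 == k) = false := by simp [hxk]
        simp [h4, h2, ih]

theorem getD_erase_of_ne (d : PySem.Dict Char Int) (k k' : Char) (h : k' ≠ k) :
    (d.erase k).getD k' 0 = d.getD k' 0 := by
  simp [PySem.Dict.erase, PySem.Dict.getD, PySem.Dict.get?, find?_filter_ne k k' h]

theorem mostLoop_eq_sel :
    ∀ (n : Nat) (d : PySem.Dict Char Int), d.keys.Nodup →
      mostLoop d n = sel (fun k => d.getD k 0) d.keys n := by
  intro n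
  induction n with
  | zero => intro d _; rfl
  | succ n ih =>
    intro d hnd
    simp only [mostLoop, sel]
    match hm : PySem.List.max? d.keys (fun k => d.getD k 0) with
    | none => rfl
    | some k =>
      dsimp only
      have hkeys : (d.erase k).keys = d.keys.erase k := by
        rw [keys_erase_eq, List.Nodup.erase_eq_filter hnd k]
        apply List.filter_congr
        intro x _
        simp [bne]
      have hnd' : (d.erase k).keys.Nodup := by
        rw [hkeys]; exact hnd.erase k
      rw [ih (d.erase k) hnd', hkeys]
      refine congrArg (k :: ·) (sel_congr _ _ n _ ?_)
      intro x hx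
      have hxk : x ≠ k := ((List.Nodup.mem_erase_iff hnd).1 hx).1
      exact getD_erase_of_ne d k x hxk

theorem pairFold_eq (l : List Char) :
    ∀ (s : PySem.Set Char),
      l.foldl (fun ks c => if PySem.Set.contains ks.2 c then ks else (ks.1 ++ [c], PySem.Set.add ks.2 c)) (s, s)
        = (PySem.Set.update s l, PySem.Set.update s l) := by
  induction l with
  | nil => intro s; simp [PySem.Set.update]
  | cons c l ih =>
    intro s
    simp only [List.foldl_cons]
    by_cases hc : PySem.Set.contains s c
    · have hmem : c ∈ s := (PySem.Set.contains_iff s c).1 hc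
      rw [if_pos hc]
      rw [ih s]
      simp [PySem.Set.update, PySem.Set.add_of_mem hmem]
    · rw [if_neg hc]
      have hnm : c ∉ s := fun hm => hc ((PySem.Set.contains_iff s c).2 hm)
      have hadd : PySem.Set.add s c = s ++ [c] := by simp [PySem.Set.add, hnm]
      rw [← hadd, ih (PySem.Set.add s c)]
      simp [PySem.Set.update]

theorem update_of_forall_mem :
    ∀ (l : List Char) (s : PySem.Set Char), (∀ x ∈ l, x ∈ s) → PySem.Set.update s l = s := by
  intro l
  induction l with
  | nil => intro s _; rfl
  | cons c l ih =>
    intro s h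
    have hadd : PySem.Set.add s c = s := PySem.Set.add_of_mem (h c List.mem_cons_self)
    have : PySem.Set.update s (c :: l) = PySem.Set.update (PySem.Set.add s c) l := by
      simp [PySem.Set.update]
    rw [this, hadd, ih s (fun x hx => h x (List.mem_cons_of_mem _ hx))]

theorem getD_zero_fold {β : Type} (key : β → Char) :
    ∀ (l : List β) (d : PySem.Dict Char Int), (∀ k, d.getD k 0 = 0) →
      ∀ k, (l.foldl (fun d i => d.insert (key i) (0 : Int)) d).getD k 0 = 0 := by
  intro l
  induction l with
  | nil => intro d h k; exact h k
  | cons x xs ih =>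
    intro d h k
    simp only [List.foldl_cons]
    apply ih
    intro k'
    by_cases hk : k' = key x
    · rw [hk, PySem.Dict.getD_insert_self]
    · rw [PySem.Dict.getD_insert_of_ne _ _ _ hk]; exact h k'

theorem foldl_max_init_le (f : Char → Int) :
    ∀ (ks : List Char) (m : Int), m ≤ ks.foldl (fun m k => if f k > m then f k else m) m := by
  intro ks
  induction ks with
  | nil => intro m; simp
  | cons k ks ih =>
    intro m
    simp only [List.foldl_cons]
    by_cases h : f k > m
    · rw [if_pos h]; exact le_of_lt (lt_of_lt_of_le h (ih (f k)))
    · rw [if_neg h]; exact ih m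

theorem foldl_max_mem_le (f : Char → Int) :
    ∀ (ks : List Char) (m : Int) (k : Char), k ∈ ks →
      f k ≤ ks.foldl (fun m k => if f k > m then f k else m) m := by
  intro ks
  induction ks with
  | nil => intro m k h; cases h
  | cons x xs ih =>
    intro m k hk
    simp only [List.foldl_cons]
    rcases List.mem_cons.1 hk with rfl | hk
    · by_cases h : f k > m
      · rw [if_pos h]; exact foldl_max_init_le f xs (f k)
      · rw [if_neg h]; exact le_trans (le_of_not_gt h) (foldl_max_init_le f xs m)
    · exact ih _ k hk

theorem buckets_getD (f : Char → Int) :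
    ∀ (ks : List Char) (bs : List (List Char)),
      (∀ k ∈ ks, 0 ≤ f k ∧ (f k).toNat < bs.length) →
      ∀ (c : Int), 0 ≤ c →
        PySem.List.pyGetD
            (ks.foldl (fun bs k => PySem.List.pySetD bs (f k) (PySem.List.pyGetD bs (f k) [] ++ [k])) bs) c []
          = PySem.List.pyGetD bs c [] ++ ks.filter (fun k => f k == c) := by
  intro ks
  induction ks with
  | nil => intro bs _ c _; simp
  | cons k ks ih =>
    intro bs hb c hc
    obtain ⟨hk0, hklt⟩ := hb k List.mem_cons_self
    have hfk : f k = ((f k).toNat : Int) := (Int.toNat_of_nonneg hk0).symm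
    have hcc : c = (c.toNat : Int) := (Int.toNat_of_nonneg hc).symm
    simp only [List.foldl_cons]
    rw [ih _ (by
        intro x hx
        refine ⟨(hb x (List.mem_cons_of_mem _ hx)).1, ?_⟩
        rw [PySem.List.length_pySetD]
        exact (hb x (List.mem_cons_of_mem _ hx)).2) c hc]
    rw [hfk, hcc, PySem.List.pyGetD_pySetD_natCast _ _ _ _ _ hklt]
    by_cases heq : c.toNat = (f k).toNat
    · simp only [if_pos heq, List.filter_cons]
      rw [← hcc, ← hfk]
      have : c = f k := by omega
      rw [this, List.append_assoc]
      simp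
    · rw [if_neg heq]
      simp [List.filter_cons]
      omega

theorem flatMap_congr_mem {α β : Type} (l : List α) (g h : α → List β)
    (hgh : ∀ x ∈ l, g x = h x) : l.flatMap g = l.flatMap h := by
  induction l with
  | nil => rfl
  | cons x xs ih =>
    simp only [List.flatMap_cons]
    rw [hgh x List.mem_cons_self, ih (fun y hy => hgh y (List.mem_cons_of_mem _ hy))]

theorem bcat_eq_flatMap (f : Char → Int) (ks : List Char) :
    ∀ (n : Nat) (M : Int),
      (List.range n).flatMap (fun (j:Nat) => ks.filter (fun k => f k == M - (j : Int)))
        = bcat f ks M n := by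
  intro n
  induction n with
  | zero => intro M; rfl
  | succ n ih =>
    intro M
    rw [List.range_succ_eq_map, List.flatMap_cons, List.flatMap_map]
    have h1 : ks.filter (fun k => f k == M - ((0:Nat) : Int)) = ks.filter (fun k => f k == M) := by
      norm_num
    have h2 : (List.range n).flatMap (fun (a:Nat) => ks.filter (fun k => f k == M - (a.succ : Int)))
        = (List.range n).flatMap (fun (j:Nat) => ks.filter (fun k => f k == (M - 1) - (j : Int))) := by
      apply flatMap_congr_mem
      intro a _
      show ks.filter (fun k => f k == M - ((a+1 : Nat) : Int)) = _
      have : M - ((a+1 : Nat) : Int) = (M - 1) - (a : Int) := by push_cast; ring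
      rw [this]
    rw [h1, h2, ih (M - 1)]
    rfl

-- the printable seed chr(32)..chr(126), the merged key list, the count function, the max count
def pvP : List Char := (PySem.List.pyRange 32 127 1).map (fun i => Char.ofNat i.toNat)
def fcnt (l : List Char) : Char → Int := fun k => ((l.count k : Nat) : Int)
def KK (l : List Char) : List Char := PySem.Set.update pvP l
def MM (l : List Char) : Int := (KK l).foldl (fun m k => if fcnt l k > m then fcnt l k else m) 0

theorem getD_zero_fold_id :
    ∀ (l : List Char) (d : PySem.Dict Char Int), (∀ k, d.getD k 0 = 0) →
      ∀ k, (l.foldl (fun d c => d.insert c (0 : Int)) d).getD k 0 = 0 := by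
  intro l
  induction l with
  | nil => intro d h k; exact h k
  | cons x xs ih =>
    intro d h k
    simp only [List.foldl_cons]
    apply ih
    intro k'
    by_cases hk : k' = x
    · rw [hk, PySem.Dict.getD_insert_self]
    · rw [PySem.Dict.getD_insert_of_ne _ _ _ hk]; exact h k'

theorem getD_replicate_nil (n i : Nat) : (List.replicate n ([] : List Char)).getD i [] = [] := by
  rw [List.getD_eq_getElem?_getD]
  by_cases h : i < n
  · simp [h]
  · simp [h]

theorem most_eq_sel (cs : String) :
    most cs = (sel (fcnt cs.toList) (KK cs.toList) (KK cs.toList).length).map (fun c => String.ofList [c]) := by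
  have hPnodup : pvP.Nodup := by decide
  simp only [most]
  congr 1
  set l := cs.toList with hl
  set d0 := (PySem.List.pyRange 32 127 1).foldl (fun d i => d.insert (Char.ofNat i.toNat) (0 : Int)) PySem.Dict.empty with hd0
  set d1 := l.foldl (fun d c => d.insert c (0 : Int)) d0 with hd1
  set d2 := l.foldl (fun d c => d.modify c 0 (· + 1)) d1 with hd2
  have hd0keys : d0.keys = pvP := by
    have := PySem.Dict.keys_foldl_insert_key (ν := Int) (PySem.List.pyRange 32 127 1)
      (fun i => Char.ofNat i.toNat) (fun _ _ => (0 : Int)) PySem.Dict.empty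
    simp only [hd0]
    rw [show (fun (d : PySem.Dict Char Int) (i : Int) => d.insert (Char.ofNat i.toNat) (0:Int))
        = (fun (d : PySem.Dict Char Int) (i : Int) => d.insert ((fun j => Char.ofNat j.toNat) i) ((fun _ _ => (0:Int)) d i)) from rfl]
    rw [this]
    have hek : (PySem.Dict.empty : PySem.Dict Char Int).keys = [] := rfl
    rw [hek, PySem.Set.update_nil_left]
    exact PySem.Set.ofList_eq_self_of_nodup pvP hPnodup
  have hd1keys : d1.keys = KK l := by
    have := PySem.Dict.keys_foldl_insert (ν := Int) l (fun _ _ => (0 : Int)) d0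
    simp only [hd1]
    rw [show (fun (d : PySem.Dict Char Int) (c : Char) => d.insert c (0:Int))
        = (fun (d : PySem.Dict Char Int) (c : Char) => d.insert c ((fun _ _ => (0:Int)) d c)) from rfl]
    rw [this, hd0keys]
    rfl
  have hd2keys : d2.keys = KK l := by
    have := PySem.Dict.keys_foldl_modify (ν := Int) l 0 (fun _ _ => (· + 1)) d1
    simp only [hd2]
    rw [show (fun (d : PySem.Dict Char Int) (c : Char) => d.modify c 0 (· + 1))
        = (fun (d : PySem.Dict Char Int) (c : Char) => d.modify c 0 ((fun _ _ => (· + (1:Int))) d c)) from rfl]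
    rw [this, hd1keys]
    exact update_of_forall_mem l (KK l) (fun x hx => (PySem.Set.mem_update pvP l x).2 (Or.inr hx))
  have hd1z : ∀ k, d1.getD k 0 = 0 := by
    apply getD_zero_fold_id
    intro k
    have := getD_zero_fold (fun i : Int => Char.ofNat i.toNat) (PySem.List.pyRange 32 127 1)
      PySem.Dict.empty (fun _ => rfl) k
    exact this
  have hd2c : ∀ k, d2.getD k 0 = fcnt l k := by
    intro k
    have := PySem.Dict.getD_foldl_modify_add_one l d1 k
    rw [hd1z k] at this
    simpa [fcnt] using this
  have hnodup : d2.keys.Nodup := by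
    rw [hd2keys]; exact PySem.Set.nodup_update pvP l hPnodup
  have hsize : d2.size = (KK l).length := by
    have : d2.size = d2.keys.length := by simp [PySem.Dict.size, PySem.Dict.keys]
    rw [this, hd2keys]
  rw [mostLoop_eq_sel d2.size d2 hnodup, hd2keys, hsize]
  exact sel_congr _ _ _ _ (fun k _ => hd2c k)

theorem most_alt_eq_bcat (cs : String) :
    most_alt cs
      = (bcat (fcnt cs.toList) (KK cs.toList) (MM cs.toList) ((MM cs.toList) + 1).toNat).map
          (fun c => String.ofList [c]) := by
  have hPnodup : pvP.Nodup := by decide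
  simp only [most_alt, mostAltKeys]
  congr 1
  set l := cs.toList with hl
  have hofL : PySem.Set.ofList pvP = pvP := PySem.Set.ofList_eq_self_of_nodup pvP hPnodup
  have hkeys : (l.foldl
      (fun ks c => if PySem.Set.contains ks.2 c then ks else (ks.1 ++ [c], PySem.Set.add ks.2 c))
      (pvP, PySem.Set.ofList pvP)).1 = KK l := by
    rw [hofL, pairFold_eq l pvP]
    rfl
  have hc : ∀ k, (l.foldl (fun d c => d.insert c (d.getD c 0 + 1)) (PySem.Dict.empty : PySem.Dict Char Int)).getD k 0
      = fcnt l k := by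
    intro k
    rw [PySem.Dict.foldl_insert_getD_add_one_eq_counter, PySem.Dict.getD_counter]
    rfl
  simp only [show ((PySem.List.pyRange 32 127 1).map (fun i => Char.ofNat i.toNat)) = pvP from rfl]
  simp only [hkeys, hc]
  simp only [show (List.foldl (fun m k => if fcnt l k > m then fcnt l k else m) 0 (KK l)) = MM l from rfl]
  set M := MM l with hM
  have hM0 : 0 ≤ M := foldl_max_init_le (fcnt l) (KK l) 0
  have hMb : ∀ k ∈ KK l, fcnt l k ≤ M := fun k hk => foldl_max_mem_le (fcnt l) (KK l) 0 k hk
  have hf0 : ∀ k, 0 ≤ fcnt l k := fun k => Int.natCast_nonneg _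
  have hbnds : ∀ k ∈ KK l, 0 ≤ fcnt l k ∧ (fcnt l k).toNat < (List.replicate (M.toNat + 1) ([] : List Char)).length := by
    intro k hk
    refine ⟨hf0 k, ?_⟩
    rw [List.length_replicate]
    have := hMb k hk
    omega
  rw [PySem.List.foldl_append_eq_flatMap, List.nil_append, PySem.List.pyRange_neg_one,
    show M - (-1) = M + 1 by ring, List.flatMap_map,
    ← bcat_eq_flatMap (fcnt l) (KK l) ((M + 1).toNat) M]
  apply flatMap_congr_mem
  intro j hj
  have hjlt : (j : Int) ≤ M := by
    rw [List.mem_range] at hj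
    omega
  show PySem.List.pyGetD _ (M - (j:Int)) [] = _
  rw [buckets_getD (fcnt l) (KK l) _ hbnds (M - (j:Int)) (by omega)]
  have hrep : PySem.List.pyGetD (List.replicate (M.toNat + 1) ([] : List Char)) (M - (j:Int)) [] = [] := by
    rw [PySem.List.pyGetD_of_nonneg _ _ (by omega : (0:Int) ≤ M - (j:Int))]
    exact getD_replicate_nil _ _
  rw [hrep, List.nil_append]

-- ===== VERDICT (by name: the statement is the Claim_ definition above) =====
theorem most_spec : Claim_equal_most := by
  intro cs _
  show most cs = most_alt cs
  rw [most_eq_sel, most_alt_eq_bcat]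
  congr 1
  refine sel_eq_bcat (fcnt cs.toList) (MM cs.toList) (foldl_max_init_le _ _ 0) _ _ le_rfl ?_
  intro k hk
  exact ⟨Int.natCast_nonneg _, foldl_max_mem_le (fcnt cs.toList) (KK cs.toList) 0 k hk⟩
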